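-- pv_equiv track=rewrite | github.com/docxology/MetaInformAnt | src/metainformant/dna/population/core.py | _count_singletons
-- ===== SOURCE A (Python) =====
-- from typing import Iterable, List, Sequence, Tuple
--
-- def _count_singletons(seqs: Sequence[str]) -> int:
--     """Count singleton mutations (alleles that appear only once)."""
--     if len(seqs) < 2:
--         return 0
--
--     seq_length = len(seqs[0])
--     singletons = 0
--
--     for pos in range(seq_length):
--         alleles = [seq[pos].upper() for seq in seqs if seq[pos].upper() in "ATCG"]
--
--         if len(alleles) < 2:
--             continue
--
--         # Count frequency of each allele
--         from collections import Counter
--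
--         counts = Counter(alleles)
--
--         # Check if any allele appears exactly once
--         if 1 in counts.values():
--             singletons += 1
--
--     return singletons
-- ===== SOURCE B (Python) =====
-- def _count_singletons(seqs):
--     """Count singleton mutations (alleles that appear only once)."""
--     if len(seqs) < 2:
--         return 0
--
--     singletons = 0
--     for pos in range(len(seqs[0])):
--         alleles = []
--         for seq in seqs:
--             a = seq[pos].upper()
--             if a in "ATCG":
--                 alleles.append(a)
--
--         if len(alleles) < 2:
--             continue
--
--         # sort the column and scan runs: a singleton exists iff some run has length 1
--         alleles.sort()
--         prev = alleles[0]
--         run = 1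
--         found = False
--         for a in alleles[1:]:
--             if a == prev:
--                 run += 1
--             else:
--                 if run == 1:
--                     found = True
--                     break
--                 prev = a
--                 run = 1
--         if found or run == 1:
--             singletons += 1
--
--     return singletons
-- ===== Notes on version B (the rewrite author's own statement) =====
-- stated objective: alternative
-- what changed: Per column, instead of building a Counter dict and testing 1 in its values, B sorts the column's valid alleles once and scans adjacent runs, counting the column if some run has length exactly 1.
import Mathlib
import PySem

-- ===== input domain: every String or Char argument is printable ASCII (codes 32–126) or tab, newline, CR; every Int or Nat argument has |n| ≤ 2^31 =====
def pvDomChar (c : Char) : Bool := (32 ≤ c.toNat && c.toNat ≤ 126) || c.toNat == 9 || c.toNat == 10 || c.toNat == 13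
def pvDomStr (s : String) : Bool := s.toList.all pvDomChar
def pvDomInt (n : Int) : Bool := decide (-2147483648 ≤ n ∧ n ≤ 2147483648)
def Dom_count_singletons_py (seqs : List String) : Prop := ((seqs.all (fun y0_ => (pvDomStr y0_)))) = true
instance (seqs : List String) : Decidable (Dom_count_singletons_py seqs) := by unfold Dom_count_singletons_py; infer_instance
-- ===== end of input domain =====

-- B replaces A's per-column Counter-and-values test by sorting the column once and scanning
-- adjacent runs for a run of length 1 (alternative algorithm, same results).

-- ===== PORT A =====
-- seq[pos] is ported with pyGetD (default 'N', not a valid base); Pre_ guarantees the index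
-- is in range wherever Python does not raise IndexError, so the default is never read there.
-- seq[pos].upper() on a one-character string is upperChar; `a in "ATCG"` on a one-character
-- string is exactly membership of the character in ['A','T','C','G'].
def count_singletons_py (seqs : List String) : Int :=
  if seqs.length < 2 then 0
  else
    let seqLength := (seqs.headD "").toList.length
    (PySem.List.pyRange 0 seqLength 1).foldl (fun singletons pos =>
      let alleles :=
        (seqs.filter (fun seq =>
          ['A','T','C','G'].contains (PySem.Chars.upperChar (PySem.List.pyGetD seq.toList pos 'N')))).map
          (fun seq => PySem.Chars.upperChar (PySem.List.pyGetD seq.toList pos 'N'))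
      if alleles.length < 2 then singletons
      else if (PySem.Dict.counter alleles).values.contains (1 : Int) then singletons + 1
      else singletons) 0

-- ===== PORT B =====
-- the run scan of Source B: `found or run == 1` with `break` becomes short-circuit ||
def pyHasSingletonRun (prev : Char) (run : Int) : List Char → Bool
  | [] => run == 1
  | a :: rest =>
      if a == prev then pyHasSingletonRun prev (run + 1) rest
      else (run == 1 || pyHasSingletonRun a 1 rest)

def count_singletons_py_alt (seqs : List String) : Int :=
  if seqs.length < 2 then 0
  else
    let seqLength := (seqs.headD "").toList.length
    (PySem.List.pyRange 0 seqLength 1).foldl (fun singletons pos =>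
      let alleles := seqs.foldl (fun acc seq =>
        if ['A','T','C','G'].contains (PySem.Chars.upperChar (PySem.List.pyGetD seq.toList pos 'N')) then
          acc ++ [PySem.Chars.upperChar (PySem.List.pyGetD seq.toList pos 'N')]
        else acc) []
      if alleles.length < 2 then singletons
      else
        match PySem.List.sorted alleles (fun x => x) false with
        | [] => singletons
        | c :: t => if pyHasSingletonRun c 1 t then singletons + 1 else singletons) 0

-- ===== PRECONDITION & SPEC =====
-- A raises IndexError iff len(seqs) ≥ 2 and some sequence is shorter than seqs[0]; Pre_ admits exactly the non-raising inputs.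
def Pre_count_singletons_py (seqs : List String) : Prop :=
  seqs.length < 2 ∨ ∀ s ∈ seqs, (seqs.headD "").toList.length ≤ s.toList.length
instance (seqs : List String) : Decidable (Pre_count_singletons_py seqs) := by
  unfold Pre_count_singletons_py; infer_instance

def pvWitness_count_singletons_py : List String := ["AT", "AA"]

def Spec_count_singletons_py (seqs : List String) (out : Int) : Prop := out = count_singletons_py_alt seqs
instance (seqs : List String) (out : Int) : Decidable (Spec_count_singletons_py seqs out) := by unfold Spec_count_singletons_py; infer_instance

-- ===== CLAIM (what is proved, stated in full; the proofs are below) =====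
def Claim_equal_count_singletons_py : Prop := ∀ (seqs : List String), Dom_count_singletons_py seqs → Pre_count_singletons_py seqs → Spec_count_singletons_py seqs (count_singletons_py seqs)

-- ===== LEMMAS AND PROOFS =====

-- A's per-column test: some count in Counter(alleles) is 1
lemma counter_values_one_iff (l : List Char) :
    (PySem.Dict.counter l).values.contains (1 : Int) = true ↔ ∃ k, l.count k = 1 := by
  simp [PySem.Dict.values, PySem.Dict.items_counter, PySem.Set.mem_ofList]
  constructor
  · rintro ⟨k, hk, h⟩; exact ⟨k, by exact_mod_cast h⟩
  · rintro ⟨k, h⟩; exact ⟨k, List.count_pos_iff.mp (by omega), by exact_mod_cast h⟩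

-- run scan on a sorted tail, characterised by counts
lemma hasSingletonRun_iff (t : List Char) : ∀ (prev : Char) (n : Int),
    (prev :: t).Pairwise (· ≤ ·) →
    (pyHasSingletonRun prev n t = true ↔
      (n + (t.count prev : Int) = 1 ∨ ∃ x ∈ t, x ≠ prev ∧ (t.count x : Int) = 1)) := by
  induction t with
  | nil =>
    intro prev n _
    simp [pyHasSingletonRun]
  | cons a t' ih =>
    intro prev n hp
    have hpa : prev ≤ a := (List.pairwise_cons.mp hp).1 a (List.mem_cons_self ..)
    have hpt : ∀ x ∈ t', prev ≤ x := fun x hx => (List.pairwise_cons.mp hp).1 x (List.mem_cons_of_mem _ hx)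
    have hat : ∀ x ∈ t', a ≤ x := fun x hx => (List.pairwise_cons.mp (List.pairwise_cons.mp hp).2).1 x hx
    have hp' : (a :: t').Pairwise (· ≤ ·) := (List.pairwise_cons.mp hp).2
    rw [pyHasSingletonRun]
    by_cases hcase : a = prev
    · subst hcase
      simp only [beq_self_eq_true, if_true]
      rw [ih a (n + 1) hp']
      constructor
      · rintro (h | ⟨x, hx, hxa, hc⟩)
        · left; simp; omega
        · right; exact ⟨x, List.mem_cons_of_mem _ hx, hxa, by simp [Ne.symm hxa, hc]⟩
      · rintro (h | ⟨x, hx, hxa, hc⟩)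
        · left; simp at h; omega
        · right
          rcases List.mem_cons.mp hx with rfl | hx'
          · exact absurd rfl hxa
          · exact ⟨x, hx', hxa, by simpa [List.count_cons, Ne.symm hxa] using hc⟩
    · have hlt : prev < a := lt_of_le_of_ne hpa (fun h => hcase h.symm)
      have hnotmem : prev ∉ a :: t' := by
        intro hm
        rcases List.mem_cons.mp hm with rfl | hm'
        · exact hcase rfl
        · exact absurd (hat _ hm') (not_le.mpr hlt)
      have hcnt0 : (a :: t').count prev = 0 := List.count_eq_zero.mpr hnotmem
      simp only [beq_iff_eq, hcase, if_false]
      rw [Bool.or_eq_true, ih a 1 (List.pairwise_cons.mpr ⟨hat, (List.pairwise_cons.mp hp').2⟩)]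
      constructor
      · rintro (h | h | ⟨x, hx, hxa, hc⟩)
        · left; rw [hcnt0]; simp at h; omega
        · right; refine ⟨a, List.mem_cons_self .., hcase, ?_⟩
          simp; omega
        · right
          have hxprev : x ≠ prev := by
            intro h; exact absurd (hat _ hx) (not_le.mpr (h ▸ hlt))
          exact ⟨x, List.mem_cons_of_mem _ hx, hxprev, by simpa [List.count_cons, Ne.symm hxa] using hc⟩
      · rintro (h | ⟨x, hx, hxp, hc⟩)
        · left; rw [hcnt0] at h; simp; omega
        · rcases List.mem_cons.mp hx with rfl | hx'
          · right; left; simp at hc; omega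
          · by_cases hxa : x = a
            · subst hxa; right; left
              simp at hc; omega
            · right; right
              exact ⟨x, hx', hxa, by simpa [List.count_cons, Ne.symm hxa] using hc⟩

-- B's per-column test equals A's
lemma column_eq (l : List Char) :
    (PySem.Dict.counter l).values.contains (1 : Int) =
    (match PySem.List.sorted l (fun x => x) false with
     | [] => false
     | c :: t => pyHasSingletonRun c 1 t) := by
  have hperm : (PySem.List.sorted l (fun x => x) false).Perm l := PySem.List.sorted_perm ..
  have hpw : (PySem.List.sorted l (fun x => x) false).Pairwise (· ≤ ·) := by
    simpa using PySem.List.sorted_pairwise (xs := l) (key := fun x => x)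
  rw [Bool.eq_iff_iff, counter_values_one_iff]
  cases hs : PySem.List.sorted l (fun x => x) false with
  | nil =>
    have hl : l = [] := (PySem.List.sorted_eq_nil_iff ..).mp hs
    subst hl; simp
  | cons c t =>
    rw [hasSingletonRun_iff t c 1 (hs ▸ hpw)]
    have hcnt : ∀ k, l.count k = (c :: t).count k := fun k => ((hs ▸ hperm).count_eq k).symm
    constructor
    · rintro ⟨k, hk⟩
      rw [hcnt] at hk
      by_cases hkc : k = c
      · subst hkc; left; simp at hk ⊢; omega
      · right
        refine ⟨k, ?_, hkc, ?_⟩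
        · have : k ∈ c :: t := List.count_pos_iff.mp (by omega)
          rcases List.mem_cons.mp this with rfl | h; · exact absurd rfl hkc
          · exact h
        · simp [Ne.symm hkc] at hk; exact_mod_cast hk
    · rintro (h | ⟨x, hx, hxc, hc⟩)
      · exact ⟨c, by rw [hcnt]; simp; omega⟩
      · exact ⟨x, by rw [hcnt]; simp [Ne.symm hxc]; exact_mod_cast hc⟩

-- ===== VERDICT (by name: the statement is the Claim_ definition above) =====
theorem count_singletons_py_spec : Claim_equal_count_singletons_py := by
  intro seqs _ _
  unfold Spec_count_singletons_py count_singletons_py count_singletons_py_alt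
  by_cases h : seqs.length < 2
  · simp [h]
  · simp only [if_neg h]
    congr 1
    funext singletons pos
    simp only [PySem.List.foldl_append_if, List.nil_append]
    set l := (seqs.filter (fun seq =>
      ['A','T','C','G'].contains (PySem.Chars.upperChar (PySem.List.pyGetD seq.toList pos 'N')))).map
      (fun seq => PySem.Chars.upperChar (PySem.List.pyGetD seq.toList pos 'N')) with hl
    rw [column_eq l]
    cases PySem.List.sorted l (fun x => x) false with
    | nil => simp
    | cons c t => rfl
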